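-- pv_equiv track=rewrite | github.com/Mrzhouxf/Master_code | model_interface/function.py | filter_by_index_and_value
-- ===== SOURCE A (Python) =====
-- def filter_by_index_and_value(data, index, value):
--     """
--     Filter subarrays in a two-dimensional array based on specified indexes and values
--     : param data:  Two-dimensional array
--     : param index:  Index to be filtered
--     : param value:  Target value (can be a single value or a list)
--     : return:  List of subarrays that meet the criteria
--     """
--     result = []
--     min_diff = float('inf')
--     closest_item = None
--     for item in data:
--         # 检查索引是否有效
--         if index < 0 or index >= len(item):
--             continue  # 跳过索引无效的子数组
--         if item[index] == value:
--             result.append(item)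
--         # 计算差值
--         diff = abs(item[index] - value)
--         if diff < min_diff:
--             min_diff = diff
--             closest_item = item
--     if not result and closest_item is not None:
--         result.append(closest_item)
--     return result
-- ===== SOURCE B (Python) =====
-- def filter_by_index_and_value(data, index, value):
--     valid = [row for row in data if 0 <= index < len(row)]
--     result = [row for row in valid if row[index] == value]
--     if result:
--         return result
--     if valid:
--         return [min(valid, key=lambda row: abs(row[index] - value))]
--     return []
-- ===== Notes on version B (the rewrite author's own statement) =====
-- stated objective: simpler
-- what changed: Two comprehension passes (valid rows, then matches) plus a builtin min(key=...) for the closest row replace A's single interleaved loop that hand-maintains result, min_diff and closest_item state.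
import Mathlib
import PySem

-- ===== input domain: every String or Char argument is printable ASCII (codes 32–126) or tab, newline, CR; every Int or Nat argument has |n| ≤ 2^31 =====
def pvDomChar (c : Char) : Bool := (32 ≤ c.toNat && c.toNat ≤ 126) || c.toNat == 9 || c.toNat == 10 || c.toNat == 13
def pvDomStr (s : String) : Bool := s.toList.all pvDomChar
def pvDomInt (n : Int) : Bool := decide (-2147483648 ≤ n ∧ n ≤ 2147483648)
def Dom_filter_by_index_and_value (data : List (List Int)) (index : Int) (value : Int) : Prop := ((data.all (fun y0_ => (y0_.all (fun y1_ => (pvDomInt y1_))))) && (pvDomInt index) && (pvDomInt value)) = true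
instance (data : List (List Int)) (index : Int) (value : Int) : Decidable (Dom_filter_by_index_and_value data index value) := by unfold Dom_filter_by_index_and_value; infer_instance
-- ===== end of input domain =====

-- B replaces A's single interleaved loop (manual result/min_diff/closest_item state)
-- with two filter passes and a builtin min-by-key; objective: simpler, same cost.


-- ===== PORT A =====
-- one loop step of A: state = (result, min_diff, closest_item); min_diff = none means float('inf')
def pvStepA (index value : Int) (st : List (List Int) × Option Int × Option (List Int))
    (item : List Int) : List (List Int) × Option Int × Option (List Int) :=
  if index < 0 ∨ (item.length : Int) ≤ index then st
  else
    let x := (PySem.List.pyGet? item index).getD 0   -- exact: index is in range here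
    let result := if x = value then st.1 ++ [item] else st.1
    let diff := |x - value|
    match st.2.1, st.2.2 with
    | none, _ => (result, some diff, some item)      -- diff < inf
    | some m, cl => if diff < m then (result, some diff, some item) else (result, some m, cl)

def filter_by_index_and_value (data : List (List Int)) (index : Int) (value : Int) : List (List Int) :=
  let st := data.foldl (pvStepA index value) ([], none, none)
  if st.1.isEmpty then
    match st.2.2 with
    | some c => st.1 ++ [c]
    | none => st.1
  else st.1

-- ===== PORT B =====
def filter_by_index_and_value_alt (data : List (List Int)) (index : Int) (value : Int) : List (List Int) :=
  let valid := data.filter (fun row => decide (0 ≤ index) && decide (index < (row.length : Int)))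
  let result := valid.filter (fun row => (PySem.List.pyGet? row index).getD 0 == value)
  if ¬ result.isEmpty then result
  else if ¬ valid.isEmpty then
    match PySem.List.min? valid (fun row => |((PySem.List.pyGet? row index).getD 0) - value|) with
    | some m => [m]
    | none => []
  else []

-- ===== PRECONDITION & SPEC =====
def Spec_filter_by_index_and_value (data : List (List Int)) (index : Int) (value : Int) (out : List (List Int)) : Prop := out = filter_by_index_and_value_alt data index value
instance (data : List (List Int)) (index : Int) (value : Int) (out : List (List Int)) : Decidable (Spec_filter_by_index_and_value data index value out) := by unfold Spec_filter_by_index_and_value; infer_instance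

-- ===== CLAIM (what is proved, stated in full; the proofs are below) =====
def Claim_equal_filter_by_index_and_value : Prop := ∀ (data : List (List Int)) (index : Int) (value : Int), Dom_filter_by_index_and_value data index value → Spec_filter_by_index_and_value data index value (filter_by_index_and_value data index value)

-- ===== LEMMAS AND PROOFS =====

-- the min?-step over the valid rows, with the key inlined (B's min)
def pvMinStep (index value : Int) (acc : Option (List Int)) (row : List Int) : Option (List Int) :=
  match acc with
  | none => some row
  | some c =>
      if |((PySem.List.pyGet? row index).getD 0) - value| <
         |((PySem.List.pyGet? c index).getD 0) - value| then some row else some c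

-- A's fold, characterised: the result is the accumulated matches among valid rows,
-- the (min_diff, closest) pair tracks exactly the running min?-fold over valid rows.
theorem pvFoldA_char (index value : Int) (l : List (List Int))
    (res : List (List Int)) (cl : Option (List Int)) :
    l.foldl (pvStepA index value)
      (res, Option.map (fun c => |((PySem.List.pyGet? c index).getD 0) - value|) cl, cl)
    = (res ++ ((l.filter (fun row => decide (0 ≤ index) && decide (index < (row.length : Int)))).filter
          (fun row => (PySem.List.pyGet? row index).getD 0 == value)),
       Option.map (fun c => |((PySem.List.pyGet? c index).getD 0) - value|)
         ((l.filter (fun row => decide (0 ≤ index) && decide (index < (row.length : Int)))).foldl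
            (pvMinStep index value) cl),
       (l.filter (fun row => decide (0 ≤ index) && decide (index < (row.length : Int)))).foldl
          (pvMinStep index value) cl) := by
  induction l generalizing res cl with
  | nil => simp
  | cons x t ih =>
      by_cases hv : index < 0 ∨ (x.length : Int) ≤ index
      · have hb : (decide (0 ≤ index) && decide (index < (x.length : Int))) = false := by
          simp only [Bool.and_eq_false_iff, decide_eq_false_iff_not]
          omega
        simp only [List.foldl_cons, List.filter_cons, hb, Bool.false_eq_true, if_false]
        rw [show pvStepA index value
              (res, Option.map (fun c => |((PySem.List.pyGet? c index).getD 0) - value|) cl, cl) x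
            = (res, Option.map (fun c => |((PySem.List.pyGet? c index).getD 0) - value|) cl, cl) from by
          simp [pvStepA, hv]]
        exact ih res cl
      · have hvx : ¬ (index < 0 ∨ (x.length : Int) ≤ index) := hv
        rw [not_or] at hv
        have hb : (decide (0 ≤ index) && decide (index < (x.length : Int))) = true := by
          simp only [Bool.and_eq_true, decide_eq_true_eq]
          omega
        have hstep : pvStepA index value
              (res, Option.map (fun c => |((PySem.List.pyGet? c index).getD 0) - value|) cl, cl) x
            = ((if ((PySem.List.pyGet? x index).getD 0) = value then res ++ [x] else res),
               Option.map (fun c => |((PySem.List.pyGet? c index).getD 0) - value|)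
                 (pvMinStep index value cl x),
               pvMinStep index value cl x) := by
          cases cl with
          | none => simp [pvStepA, pvMinStep, if_neg hvx]
          | some c =>
              simp only [pvStepA, pvMinStep, Option.map_some, if_neg hvx]
              split_ifs <;> simp
        simp only [List.foldl_cons, hstep, List.filter_cons, hb]
        rw [ih _ (pvMinStep index value cl x)]
        by_cases hm : ((PySem.List.pyGet? x index).getD 0) = value
        · simp [hm]
        · simp [hm]

-- B's min? is exactly the pvMinStep fold from none
theorem pvMin?_eq (index value : Int) (l : List (List Int)) :
    PySem.List.min? l (fun row => |((PySem.List.pyGet? row index).getD 0) - value|)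
    = l.foldl (pvMinStep index value) none := by
  unfold PySem.List.min?
  congr 1
  funext acc x
  cases acc <;> rfl

theorem pvMinStep_fold_some_ne_none (index value : Int) (t : List (List Int)) (a : List Int) :
    t.foldl (pvMinStep index value) (some a) ≠ none := by
  induction t generalizing a with
  | nil => simp
  | cons y t ih =>
      simp only [List.foldl_cons, pvMinStep]
      split_ifs <;> exact ih _

theorem pvMinStep_fold_ne_none (index value : Int) (l : List (List Int)) (h : l ≠ []) :
    l.foldl (pvMinStep index value) none ≠ none := by
  cases l with
  | nil => exact absurd rfl h
  | cons x t =>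
      simp only [List.foldl_cons, pvMinStep]
      exact pvMinStep_fold_some_ne_none index value t x

-- ===== VERDICT (by name: the statement is the Claim_ definition above) =====
theorem filter_by_index_and_value_spec : Claim_equal_filter_by_index_and_value := by
  intro data index value _
  unfold Spec_filter_by_index_and_value filter_by_index_and_value filter_by_index_and_value_alt
  have h := pvFoldA_char index value data [] none
  simp only [Option.map_none, List.nil_append] at h
  rw [h]
  simp only [pvMin?_eq]
  by_cases hr : ((data.filter (fun row => decide (0 ≤ index) && decide (index < (row.length : Int)))).filter
      (fun row => (PySem.List.pyGet? row index).getD 0 == value)).isEmpty = true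
  · rw [if_pos hr, if_neg (not_not_intro hr)]
    have hres : (data.filter (fun row => decide (0 ≤ index) && decide (index < (row.length : Int)))).filter
        (fun row => (PySem.List.pyGet? row index).getD 0 == value) = [] := List.isEmpty_iff.mp hr
    by_cases hvv : (data.filter (fun row => decide (0 ≤ index) && decide (index < (row.length : Int)))) = []
    · simp only [hvv, List.foldl_nil, List.isEmpty_nil]
      simp
    · have hnn := pvMinStep_fold_ne_none index value _ hvv
      cases hfold : (data.filter (fun row => decide (0 ≤ index) && decide (index < (row.length : Int)))).foldl
          (pvMinStep index value) none with
      | none => exact absurd hfold hnn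
      | some c =>
          simp [hres, hvv]
  · rw [if_neg hr, if_pos hr]
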